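-- pv_equiv track=rewrite | github.com/landron/Problems | hackerrank/algo/Hash_and_dict/triplets_geometric_progression.py | count_triplets_ratio_1
-- ===== SOURCE A (Python) =====
-- def combinations_3(number):
--     '''calculate combinations of three'''
--     assert number >= 2
--     return number*(number-1)*(number-2)//6
--
-- def count_triplets_ratio_1(arr):
--     '''
--         calculate the number of triplets for the given array with ratio 1
--     '''
--     dic_values = {}
--     for i in arr:
--         if i in dic_values:
--             dic_values[i] += 1
--         else:
--             dic_values[i] = 1
--
--     triplets_no = 0
--     for i in dic_values:
--         if dic_values[i] > 2:
--             triplets_no += combinations_3(dic_values[i])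
--     return triplets_no
-- ===== SOURCE B (Python) =====
-- def count_triplets_ratio_1(arr):
--     '''
--         calculate the number of triplets for the given array with ratio 1
--         (sort-then-scan over runs of equal values instead of a hash frequency table)
--     '''
--     s = sorted(arr)
--     if not s:
--         return 0
--     total = 0
--     prev = s[0]
--     run = 1
--     for x in s[1:]:
--         if x == prev:
--             run += 1
--         else:
--             if run >= 3:
--                 total += run * (run - 1) * (run - 2) // 6
--             prev = x
--             run = 1
--     if run >= 3:
--         total += run * (run - 1) * (run - 2) // 6
--     return total
-- ===== Notes on version B (the rewrite author's own statement) =====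
-- stated objective: alternative
-- what changed: Replaces the hash-map frequency table and key iteration with a sorted copy scanned once, accumulating C(L,3) for each maximal run of equal values.
import Mathlib
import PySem

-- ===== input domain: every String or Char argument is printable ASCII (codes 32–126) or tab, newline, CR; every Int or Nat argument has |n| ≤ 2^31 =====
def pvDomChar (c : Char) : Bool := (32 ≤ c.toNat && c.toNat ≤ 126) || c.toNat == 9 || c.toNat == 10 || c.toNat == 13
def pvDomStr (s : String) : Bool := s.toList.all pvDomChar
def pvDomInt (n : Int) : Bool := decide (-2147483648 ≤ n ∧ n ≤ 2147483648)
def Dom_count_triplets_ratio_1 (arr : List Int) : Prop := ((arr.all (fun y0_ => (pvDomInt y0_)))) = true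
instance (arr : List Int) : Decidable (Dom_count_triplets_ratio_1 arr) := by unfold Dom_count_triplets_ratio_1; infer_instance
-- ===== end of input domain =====

-- B replaces A's hash-map frequency table with a sort-then-scan over runs of equal values;
-- objective: alternative (same results, a different algorithm of similar cost).

-- ===== PORT A =====
-- combinations_3: the assert number >= 2 always holds at the single call site (guarded by > 2)
def combinations_3 (number : Int) : Int :=
  PySem.Int.floordiv (number * (number - 1) * (number - 2)) 6

def count_triplets_ratio_1 (arr : List Int) : Int :=
  let dic_values : PySem.Dict Int Int :=
    arr.foldl (fun d i =>
      if d.contains i then d.insert i (d.getD i 0 + 1) else d.insert i 1)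
      PySem.Dict.empty
  (PySem.Dict.keys dic_values).foldl (fun triplets_no i =>
      if dic_values.getD i 0 > 2 then triplets_no + combinations_3 (dic_values.getD i 0)
      else triplets_no)
    0

-- ===== PORT B =====
-- one step of B's loop over the tail of the sorted list; state = (total, prev, run)
def pvStepB (st : Int × Int × Int) (x : Int) : Int × Int × Int :=
  if x = st.2.1 then (st.1, st.2.1, st.2.2 + 1)
  else ((if st.2.2 ≥ 3 then st.1 + PySem.Int.floordiv (st.2.2 * (st.2.2 - 1) * (st.2.2 - 2)) 6 else st.1), x, 1)

def count_triplets_ratio_1_alt (arr : List Int) : Int :=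
  match PySem.List.sorted arr (fun x => x) false with
  | [] => 0
  | x :: xs =>
    let st := xs.foldl pvStepB (0, x, 1)
    if st.2.2 ≥ 3 then st.1 + PySem.Int.floordiv (st.2.2 * (st.2.2 - 1) * (st.2.2 - 2)) 6 else st.1

-- ===== PRECONDITION & SPEC =====
def Spec_count_triplets_ratio_1 (arr : List Int) (out : Int) : Prop := out = count_triplets_ratio_1_alt arr
instance (arr : List Int) (out : Int) : Decidable (Spec_count_triplets_ratio_1 arr out) := by unfold Spec_count_triplets_ratio_1; infer_instance

-- ===== CLAIM (what is proved, stated in full; the proofs are below) =====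
def Claim_equal_count_triplets_ratio_1 : Prop := ∀ (arr : List Int), Dom_count_triplets_ratio_1 arr → Spec_count_triplets_ratio_1 arr (count_triplets_ratio_1 arr)

-- ===== LEMMAS AND PROOFS =====

-- contribution of one value with multiplicity r
def pvF (r : Int) : Int :=
  if r ≥ 3 then PySem.Int.floordiv (r * (r - 1) * (r - 2)) 6 else 0

-- the common specification value: sum over the distinct values of C(count, 3)
def pvSpecSum (l : List Int) : Int := ∑ v ∈ l.toFinset, pvF (l.count v)

-- B's final "flush the last run" step
def pvFinish (st : Int × Int × Int) : Int :=
  if st.2.2 ≥ 3 then st.1 + PySem.Int.floordiv (st.2.2 * (st.2.2 - 1) * (st.2.2 - 2)) 6 else st.1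

lemma pvFinish_eq (st : Int × Int × Int) : pvFinish st = st.1 + pvF st.2.2 := by
  unfold pvFinish pvF; split_ifs <;> ring

-- peeling the head value off the grouped sum
lemma pvInsertSum (x : Int) (xs : List Int) :
    pvSpecSum (x :: xs)
      = pvF (((x :: xs).count x : Int)) + ∑ v ∈ (xs.filter (· ≠ x)).toFinset, pvF ((xs.count v : Int)) := by
  unfold pvSpecSum
  have hfil : (xs.filter (· ≠ x)).toFinset = xs.toFinset.erase x := by
    ext v; simp [and_comm]
  rw [hfil, List.toFinset_cons]
  have hmem : x ∈ insert x xs.toFinset := Finset.mem_insert_self x xs.toFinset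
  rw [← Finset.add_sum_erase _ _ hmem, Finset.erase_insert_eq_erase]
  refine congrArg₂ (· + ·) rfl ?_
  refine Finset.sum_congr rfl (fun v hv => ?_)
  have hne : v ≠ x := Finset.ne_of_mem_erase hv
  rw [List.count_cons_of_ne hne.symm]

-- A's dict loop is the branch-free counter fold
lemma pvDictEq (arr : List Int) :
    (arr.foldl (fun d i =>
        if d.contains i then d.insert i (d.getD i 0 + 1) else d.insert i 1)
        PySem.Dict.empty)
      = PySem.Dict.counter arr := by
  have h : (fun (d : PySem.Dict Int Int) i =>
      if d.contains i then d.insert i (d.getD i 0 + 1) else d.insert i 1)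
      = fun d i => d.insert i (d.getD i 0 + 1) := by
    funext d i
    by_cases h : d.contains i = true
    · simp [h]
    · have hf : d.contains i = false := by simpa using h
      have h0 : d.getD i 0 = 0 := PySem.Dict.getD_of_not_contains (k := i) d 0 hf
      simp [h, h0]
  rw [h, PySem.Dict.foldl_insert_getD_add_one_eq_counter]

lemma pvAEq (arr : List Int) : count_triplets_ratio_1 arr = pvSpecSum arr := by
  unfold count_triplets_ratio_1
  rw [pvDictEq arr]
  show (PySem.Dict.counter arr).keys.foldl (fun triplets_no i =>
      if (PySem.Dict.counter arr).getD i 0 > 2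
      then triplets_no + combinations_3 ((PySem.Dict.counter arr).getD i 0)
      else triplets_no) 0 = pvSpecSum arr
  have hstep : (fun (triplets_no : Int) (i : Int) =>
      if (PySem.Dict.counter arr).getD i 0 > 2
      then triplets_no + combinations_3 ((PySem.Dict.counter arr).getD i 0)
      else triplets_no)
      = fun triplets_no i => triplets_no + pvF ((arr.count i : Int)) := by
    funext t i
    rw [PySem.Dict.getD_counter]
    unfold combinations_3 pvF
    split_ifs with h1 h2 h3
    · rfl
    · exact absurd h1 (by omega)
    · exact absurd h3 (by intro h; omega)
    · ring
  rw [PySem.Dict.keys_counter, hstep, PySem.List.foldl_add, zero_add]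
  unfold pvSpecSum
  have hfs : (PySem.Set.ofList arr).toFinset = arr.toFinset := by
    ext v; simp [PySem.Set.mem_ofList]
  rw [← hfs, List.sum_toFinset _ (PySem.Set.nodup_ofList arr)]

-- the run scan over a sorted tail with lower bound p computes the grouped sum
lemma pvScanEq (l : List Int) :
    ∀ (p total run : Int), l.Pairwise (· ≤ ·) → (∀ a ∈ l, p ≤ a) →
    pvFinish (l.foldl pvStepB (total, p, run))
      = total + pvF (run + (l.count p : Int))
        + ∑ v ∈ (l.filter (· ≠ p)).toFinset, pvF ((l.count v : Int)) := by
  induction l with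
  | nil => intro p total run _ _; simp [pvFinish_eq]
  | cons x xs ih =>
    intro p total run hpw hlb
    have hpw' : xs.Pairwise (· ≤ ·) := hpw.of_cons
    have hxle : ∀ a ∈ xs, x ≤ a := fun a ha => (List.pairwise_cons.mp hpw).1 a ha
    by_cases hx : x = p
    · subst hx
      have hstep : pvStepB (total, x, run) x = (total, x, run + 1) := by
        simp [pvStepB]
      rw [List.foldl_cons, hstep, ih x total (run + 1) hpw' hxle]
      have hc : ((x :: xs).count x : Int) = (xs.count x : Int) + 1 := by
        rw [List.count_cons_self]; push_cast; ring
      have hfil : (x :: xs).filter (· ≠ x) = xs.filter (· ≠ x) := by simp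
      rw [hc, hfil]
      have hsum : ∑ v ∈ (xs.filter (· ≠ x)).toFinset, pvF ((xs.count v : Int))
          = ∑ v ∈ (xs.filter (· ≠ x)).toFinset, pvF (((x :: xs).count v : Int)) := by
        refine Finset.sum_congr rfl (fun v hv => ?_)
        have hne : v ≠ x := by
          have := List.mem_toFinset.mp hv
          simpa using (List.of_mem_filter this)
        rw [List.count_cons_of_ne hne.symm]
      rw [hsum]; ring_nf
    · -- new run starts at x
      have hpx : p < x := lt_of_le_of_ne (hlb x (List.mem_cons_self)) (Ne.symm hx)
      have hlt : ∀ a ∈ x :: xs, p < a := by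
        intro a ha
        rcases List.mem_cons.mp ha with rfl | ha'
        · exact hpx
        · exact lt_of_lt_of_le hpx (hxle a ha')
      have hnotp : ∀ a ∈ x :: xs, a ≠ p := fun a ha => (hlt a ha).ne'
      have hstep : pvStepB (total, p, run) x
          = ((if run ≥ 3 then total + PySem.Int.floordiv (run * (run - 1) * (run - 2)) 6 else total), x, 1) := by
        simp [pvStepB, hx]
      have htot : (if run ≥ 3 then total + PySem.Int.floordiv (run * (run - 1) * (run - 2)) 6 else total)
          = total + pvF run := by
        unfold pvF; split_ifs <;> ring
      rw [List.foldl_cons, hstep, htot, ih x (total + pvF run) 1 hpw' hxle]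
      have hcount0 : ((x :: xs).count p : Int) = 0 := by
        have : (x :: xs).count p = 0 := List.count_eq_zero.mpr (fun h => hnotp p h rfl)
        rw [this]; rfl
      have hfilp : (x :: xs).filter (· ≠ p) = x :: xs := by
        apply List.filter_eq_self.mpr
        intro a ha; simpa using hnotp a ha
      rw [hcount0, hfilp, add_zero]
      have hpeel := pvInsertSum x xs
      unfold pvSpecSum at hpeel
      have hc1 : (1 : Int) + (xs.count x : Int) = ((x :: xs).count x : Int) := by
        rw [List.count_cons_self]; push_cast; ring
      rw [hc1, hpeel]; ring

lemma pvBEq (arr : List Int) : count_triplets_ratio_1_alt arr = pvSpecSum arr := by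
  unfold count_triplets_ratio_1_alt
  rcases hs : PySem.List.sorted arr (fun x => x) false with _ | ⟨x, xs⟩
  · have : arr = [] := by
      have := PySem.List.sorted_perm arr (fun x : Int => x) false
      rw [hs] at this
      exact (List.Perm.nil_eq this).symm
    simp [this, pvSpecSum]
  · have hperm : (x :: xs).Perm arr := by
      have := PySem.List.sorted_perm arr (fun x : Int => x) false
      rwa [hs] at this
    have hpw : (x :: xs).Pairwise (· ≤ ·) := by
      have := PySem.List.sorted_pairwise arr (fun x : Int => x)
      rwa [hs] at this
    have hxle : ∀ a ∈ xs, x ≤ a := fun a ha => (List.pairwise_cons.mp hpw).1 a ha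
    have hmain := pvScanEq xs x 0 1 hpw.of_cons hxle
    show pvFinish (xs.foldl pvStepB (0, x, 1)) = _
    rw [hmain, zero_add]
    have hc1 : (1 : Int) + (xs.count x : Int) = ((x :: xs).count x : Int) := by
      rw [List.count_cons_self]; push_cast; ring
    rw [hc1, ← pvInsertSum x xs]
    -- pvSpecSum is invariant under permutation
    unfold pvSpecSum
    rw [List.toFinset_eq_of_perm _ _ hperm]
    refine Finset.sum_congr rfl (fun v _ => ?_)
    rw [hperm.count_eq]

-- ===== VERDICT (by name: the statement is the Claim_ definition above) =====
theorem count_triplets_ratio_1_spec : Claim_equal_count_triplets_ratio_1 := by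
  intro arr _
  unfold Spec_count_triplets_ratio_1
  rw [pvAEq, pvBEq]
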